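-- pv_equiv track=rewrite | github.com/abdullah-khan-cs/house_price_predictor | predictor_core.py | build_sidebar_society_matches
-- ===== SOURCE A (Python) =====
-- def build_sidebar_society_matches(societies, query_lower):
--     prefix_matches = [society for society in societies if society.lower().startswith(query_lower)]
--     word_prefix_matches = [
--         society for society in societies
--         if society not in prefix_matches and any(word.startswith(query_lower) for word in society.lower().split())
--     ]
--     contains_matches = [
--         society for society in societies
--         if society not in prefix_matches and society not in word_prefix_matches and query_lower in society.lower()
--     ]
--     return prefix_matches + word_prefix_matches + contains_matches
-- ===== SOURCE B (Python) =====
-- def build_sidebar_society_matches(societies, query_lower):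
--     prefix_matches, word_prefix_matches, contains_matches = [], [], []
--     for society in societies:
--         low = society.lower()
--         if low.startswith(query_lower):
--             prefix_matches.append(society)
--         elif any(word.startswith(query_lower) for word in low.split()):
--             word_prefix_matches.append(society)
--         elif query_lower in low:
--             contains_matches.append(society)
--     return prefix_matches + word_prefix_matches + contains_matches
-- ===== Notes on version B (the rewrite author's own statement) =====
-- stated objective: alternative
-- what changed: Single pass classifying each society by priority into three buckets, replacing A's three comprehensions whose later ones re-scan the earlier result lists with 'not in' membership tests (quadratic in the worst case; measured only ~1.2x on random inputs, so no speed claim).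
import Mathlib
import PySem

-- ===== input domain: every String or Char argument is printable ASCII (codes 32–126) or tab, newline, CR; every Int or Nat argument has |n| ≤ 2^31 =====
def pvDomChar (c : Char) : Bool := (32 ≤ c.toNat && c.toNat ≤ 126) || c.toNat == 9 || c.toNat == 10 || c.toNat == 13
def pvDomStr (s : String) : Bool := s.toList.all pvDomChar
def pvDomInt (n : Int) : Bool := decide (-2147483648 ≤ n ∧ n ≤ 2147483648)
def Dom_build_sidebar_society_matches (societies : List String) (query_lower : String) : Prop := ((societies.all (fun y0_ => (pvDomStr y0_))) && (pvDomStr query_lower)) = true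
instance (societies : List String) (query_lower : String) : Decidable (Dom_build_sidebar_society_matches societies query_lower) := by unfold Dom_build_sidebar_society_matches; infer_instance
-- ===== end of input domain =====

-- B replaces A's three comprehensions (the later ones re-scanning the earlier result lists
-- via 'not in') by one pass that classifies each society by priority into three buckets.

-- ===== PORT A =====
def build_sidebar_society_matches (societies : List String) (query_lower : String) : List String :=
  let prefix_matches := societies.filter
    (fun society => PySem.Str.startswith (PySem.Str.lower society) query_lower)
  let word_prefix_matches := societies.filter
    (fun society => !prefix_matches.contains society &&
      (PySem.Str.split₀ (PySem.Str.lower society)).any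
        (fun word => PySem.Str.startswith word query_lower))
  let contains_matches := societies.filter
    (fun society => !prefix_matches.contains society && !word_prefix_matches.contains society &&
      PySem.Str.isIn query_lower (PySem.Str.lower society))
  prefix_matches ++ word_prefix_matches ++ contains_matches

-- ===== PORT B =====
def build_sidebar_society_matches_alt (societies : List String) (query_lower : String) : List String :=
  let out := societies.foldl
    (fun (acc : List String × List String × List String) society =>
      let low := PySem.Str.lower society
      if PySem.Str.startswith low query_lower then
        (acc.1 ++ [society], acc.2.1, acc.2.2)
      else if (PySem.Str.split₀ low).any (fun word => PySem.Str.startswith word query_lower) then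
        (acc.1, acc.2.1 ++ [society], acc.2.2)
      else if PySem.Str.isIn query_lower low then
        (acc.1, acc.2.1, acc.2.2 ++ [society])
      else acc)
    ([], [], [])
  out.1 ++ out.2.1 ++ out.2.2

-- ===== PRECONDITION & SPEC =====
def Spec_build_sidebar_society_matches (societies : List String) (query_lower : String) (out : List String) : Prop := out = build_sidebar_society_matches_alt societies query_lower
instance (societies : List String) (query_lower : String) (out : List String) : Decidable (Spec_build_sidebar_society_matches societies query_lower out) := by unfold Spec_build_sidebar_society_matches; infer_instance

-- ===== CLAIM (what is proved, stated in full; the proofs are below) =====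
def Claim_equal_build_sidebar_society_matches : Prop := ∀ (societies : List String) (query_lower : String), Dom_build_sidebar_society_matches societies query_lower → Spec_build_sidebar_society_matches societies query_lower (build_sidebar_society_matches societies query_lower)

-- ===== LEMMAS AND PROOFS =====

-- the three classification predicates, by priority
def pvP (q s : String) : Bool := PySem.Str.startswith (PySem.Str.lower s) q
def pvQ (q s : String) : Bool :=
  (PySem.Str.split₀ (PySem.Str.lower s)).any (fun word => PySem.Str.startswith word q)
def pvC (q s : String) : Bool := PySem.Str.isIn q (PySem.Str.lower s)

-- B's loop body (definitionally equal to the lambda in the port)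
def pvStep (q : String) (acc : List String × List String × List String) (s : String) :
    List String × List String × List String :=
  if pvP q s then (acc.1 ++ [s], acc.2.1, acc.2.2)
  else if pvQ q s then (acc.1, acc.2.1 ++ [s], acc.2.2)
  else if pvC q s then (acc.1, acc.2.1, acc.2.2 ++ [s])
  else acc

-- membership in a filtered sublist, for an element of the base list, is the predicate itself
theorem pv_contains_filter (l : List String) (p : String → Bool) (s : String) (hs : s ∈ l) :
    (l.filter p).contains s = p s := by
  by_cases h : p s = true
  · simp [List.mem_filter, hs, h]
  · simp only [Bool.not_eq_true] at h
    simp [List.mem_filter, h]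

-- the fold of B accumulates the three priority filters
theorem pv_fold_inv (q : String) (l : List String) (a b c : List String) :
    l.foldl (pvStep q) (a, b, c)
    = (a ++ l.filter (fun s => pvP q s),
       b ++ l.filter (fun s => !pvP q s && pvQ q s),
       c ++ l.filter (fun s => !pvP q s && !pvQ q s && pvC q s)) := by
  induction l generalizing a b c with
  | nil => simp
  | cons x xs ih =>
    rw [List.foldl_cons]
    by_cases hp : pvP q x = true
    · rw [show pvStep q (a, b, c) x = (a ++ [x], b, c) by simp [pvStep, hp], ih]
      simp [hp]
    · simp only [Bool.not_eq_true] at hp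
      by_cases hq : pvQ q x = true
      · rw [show pvStep q (a, b, c) x = (a, b ++ [x], c) by simp [pvStep, hp, hq], ih]
        simp [hp, hq]
      · simp only [Bool.not_eq_true] at hq
        by_cases hc : pvC q x = true
        · rw [show pvStep q (a, b, c) x = (a, b, c ++ [x]) by simp [pvStep, hp, hq, hc], ih]
          simp [hp, hq, hc]
        · simp only [Bool.not_eq_true] at hc
          rw [show pvStep q (a, b, c) x = (a, b, c) by simp [pvStep, hp, hq, hc], ih]
          simp [hp, hq, hc]

-- A's second comprehension equals the priority filter for word-prefix matches
theorem pv_word_filter (l : List String) (q : String) :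
    l.filter (fun s => !(l.filter (fun t => pvP q t)).contains s && pvQ q s)
    = l.filter (fun s => !pvP q s && pvQ q s) := by
  apply List.filter_congr
  intro s hs
  rw [pv_contains_filter l _ s hs]

-- A's third comprehension equals the priority filter for contains matches
theorem pv_contains_filter3 (l : List String) (q : String) :
    l.filter (fun s => !(l.filter (fun t => pvP q t)).contains s &&
        !(l.filter (fun t => !pvP q t && pvQ q t)).contains s && pvC q s)
    = l.filter (fun s => !pvP q s && !pvQ q s && pvC q s) := by
  apply List.filter_congr
  intro s hs
  rw [pv_contains_filter l _ s hs, pv_contains_filter l _ s hs]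
  cases hp : pvP q s <;> cases hq : pvQ q s <;> simp

-- ===== VERDICT (by name: the statement is the Claim_ definition above) =====
theorem build_sidebar_society_matches_spec : Claim_equal_build_sidebar_society_matches := by
  intro societies q _
  show build_sidebar_society_matches societies q = build_sidebar_society_matches_alt societies q
  have hB : build_sidebar_society_matches_alt societies q
      = societies.filter (fun s => pvP q s)
        ++ societies.filter (fun s => !pvP q s && pvQ q s)
        ++ societies.filter (fun s => !pvP q s && !pvQ q s && pvC q s) := by
    show (let out := societies.foldl (pvStep q) ([], [], []);
          out.1 ++ out.2.1 ++ out.2.2) = _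
    rw [pv_fold_inv]
    simp
  rw [hB]
  show societies.filter (fun s => pvP q s)
        ++ societies.filter (fun s =>
            !(societies.filter (fun t => pvP q t)).contains s && pvQ q s)
        ++ societies.filter (fun s =>
            !(societies.filter (fun t => pvP q t)).contains s &&
            !(societies.filter (fun t =>
                !(societies.filter (fun u => pvP q u)).contains t && pvQ q t)).contains s &&
            pvC q s)
      = societies.filter (fun s => pvP q s)
        ++ societies.filter (fun s => !pvP q s && pvQ q s)
        ++ societies.filter (fun s => !pvP q s && !pvQ q s && pvC q s)
  rw [pv_word_filter, pv_contains_filter3]
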